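-- pv_equiv track=rewrite | github.com/mrtakata/competitive-programming | codeforces/50 - Codeforces Beta Round 47/b.py | solve
-- ===== SOURCE A (Python) =====
-- def solve(string):
--     chars = {}
--     ans = 0
--     for char in string:
--         if char in chars:
--             chars[char] += 1
--         else:
--             chars[char] = 1
--     for char in chars:
--         ans += chars[char] ** 2
--     return ans
-- ===== SOURCE B (Python) =====
-- def solve(string):
--     ans = 0
--     run = 0
--     prev = None
--     for c in sorted(string):
--         if c == prev:
--             run += 1
--         else:
--             ans += run ** 2
--             prev = c
--             run = 1
--     return ans + run ** 2
-- ===== Notes on version B (the rewrite author's own statement) =====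
-- stated objective: alternative
-- what changed: Replaces the dict-of-counts (build a frequency map, then sum squared values) by sort-then-sweep: sort the characters and make one linear pass that squares and accumulates the length of each maximal run of equal characters.
import Mathlib
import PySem

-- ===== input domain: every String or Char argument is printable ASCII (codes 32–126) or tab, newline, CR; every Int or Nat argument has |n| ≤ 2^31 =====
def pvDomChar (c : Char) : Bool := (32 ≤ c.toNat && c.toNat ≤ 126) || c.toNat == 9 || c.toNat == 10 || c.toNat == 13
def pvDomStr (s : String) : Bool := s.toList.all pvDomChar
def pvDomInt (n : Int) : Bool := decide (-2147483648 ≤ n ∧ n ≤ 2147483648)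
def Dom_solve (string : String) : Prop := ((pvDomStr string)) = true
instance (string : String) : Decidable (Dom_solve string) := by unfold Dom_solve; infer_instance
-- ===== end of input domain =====

-- B replaces A's frequency dictionary by sort-then-sweep over runs of equal characters (alternative decomposition, same result).

-- ===== PORT A =====
-- count each character in a dict, then sum the squared counts over the dict's keys
def solve (string : String) : Int :=
  let chars := string.toList.foldl
    (fun d c => if d.contains c then d.insert c (d.getD c 0 + 1) else d.insert c 1)
    PySem.Dict.empty
  chars.keys.foldl (fun ans c => ans + (chars.getD c 0) ^ 2) 0

-- ===== PORT B =====
-- one step of B's sweep over the sorted characters: state = (ans, prev, run)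
def bStep (s : Int × Option Char × Int) (c : Char) : Int × Option Char × Int :=
  if some c = s.2.1 then (s.1, s.2.1, s.2.2 + 1) else (s.1 + s.2.2 ^ 2, some c, 1)

def solve_alt (string : String) : Int :=
  let st := (PySem.List.sorted string.toList (fun x => x) false).foldl bStep (0, none, 0)
  st.1 + st.2.2 ^ 2

-- ===== PRECONDITION & SPEC =====
def Spec_solve (string : String) (out : Int) : Prop := out = solve_alt string
instance (string : String) (out : Int) : Decidable (Spec_solve string out) := by unfold Spec_solve; infer_instance

-- ===== CLAIM (what is proved, stated in full; the proofs are below) =====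
def Claim_equal_solve : Prop := ∀ (string : String), Dom_solve string → Spec_solve string (solve string)

-- ===== LEMMAS AND PROOFS =====

-- the common reference value: sum of squared multiplicities
def sqSum (ys : List Char) : Int := ∑ a ∈ ys.toFinset, ((ys.count a : Int)) ^ 2

lemma sqSum_perm {ys zs : List Char} (h : ys.Perm zs) : sqSum ys = sqSum zs := by
  unfold sqSum
  rw [List.toFinset_eq_of_perm ys zs h]
  exact Finset.sum_congr rfl (fun a _ => by rw [h.count_eq])

lemma sqSum_cons (c : Char) (t : List Char) :
    sqSum (c :: t) = (((c :: t).count c : Int)) ^ 2 + sqSum (t.filter (fun y => decide (y ≠ c))) := by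
  have hfin : (c :: t).toFinset = insert c (t.filter (fun y => decide (y ≠ c))).toFinset := by
    ext a
    by_cases hac : a = c <;> simp [hac]
  have hnot : c ∉ (t.filter (fun y => decide (y ≠ c))).toFinset := by simp
  unfold sqSum
  rw [hfin, Finset.sum_insert hnot]
  congr 1
  refine Finset.sum_congr rfl (fun a ha => ?_)
  have hac : a ≠ c := by
    simp only [List.mem_toFinset, List.mem_filter, decide_eq_true_eq] at ha
    exact ha.2
  simp [hac, Ne.symm hac, List.count_filter]

-- ===== A-side =====

-- A's counting loop builds exactly collections.Counter(l)
lemma dict_eq (l : List Char) :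
    l.foldl (fun d c => if d.contains c then d.insert c (d.getD c 0 + 1) else d.insert c 1)
      PySem.Dict.empty = PySem.Dict.counter l := by
  rw [← PySem.Dict.foldl_insert_getD_add_one_eq_counter]
  apply PySem.List.foldl_congr_mem
  intro d x _
  by_cases h : d.contains x
  · simp [h]
  · rw [if_neg (by simp [h]),
      PySem.Dict.getD_of_not_contains d 0 (by simpa using h), zero_add]

lemma solve_eq_sqSum (s : String) : solve s = sqSum s.toList := by
  unfold solve
  simp only [dict_eq]
  rw [PySem.List.foldl_add _ (fun c => (PySem.Dict.counter s.toList).getD c 0 ^ 2) 0]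
  rw [PySem.Dict.keys_counter]
  have hmap : (PySem.Set.ofList s.toList).map (fun c => (PySem.Dict.counter s.toList).getD c 0 ^ 2)
      = (PySem.Set.ofList s.toList).map (fun c => ((s.toList.count c : Int)) ^ 2) := by
    refine List.map_congr_left (fun c _ => ?_)
    rw [PySem.Dict.getD_counter]
  rw [hmap, ← List.sum_toFinset _ (PySem.Set.nodup_ofList s.toList)]
  have hfin : (PySem.Set.ofList s.toList).toFinset = s.toList.toFinset := by
    ext a; simp [PySem.Set.mem_ofList]
  rw [hfin]
  unfold sqSum
  rw [zero_add]

-- ===== B-side =====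

-- absorbing a run of equal characters
lemma bStep_replicate (c : Char) (zs : List Char) :
    ∀ (m : Nat) (ans run : Int),
      (List.replicate m c ++ zs).foldl bStep (ans, some c, run)
        = zs.foldl bStep (ans, some c, run + m) := by
  intro m
  induction m with
  | zero => intro ans run; simp
  | succ k ih =>
      intro ans run
      rw [List.replicate_succ, List.cons_append, List.foldl_cons]
      rw [show bStep (ans, some c, run) c = (ans, some c, run + 1) by simp [bStep]]
      rw [ih]
      congr 2
      push_cast
      ring_nf

-- a sorted list starts with all copies of its head
lemma sorted_head_decomp : ∀ (t : List Char) (c : Char),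
    List.Pairwise (· ≤ ·) (c :: t) →
    c :: t = List.replicate ((c :: t).count c) c ++ t.filter (fun y => decide (y ≠ c)) := by
  intro t
  induction t with
  | nil => intro c _; simp
  | cons b t' ih =>
      intro c hp
      by_cases hbc : b = c
      · subst hbc
        have hp' : List.Pairwise (· ≤ ·) (b :: t') := hp.sublist (by simp)
        have hrec := ih b hp'
        rw [List.count_cons_self] at hrec
        have hf : (b :: t').filter (fun y => decide (y ≠ b)) = t'.filter (fun y => decide (y ≠ b)) := by
          simp
        rw [List.count_cons_self, List.count_cons_self, List.replicate_succ, List.cons_append,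
          hf, ← hrec]
      · have hcb : c ≤ b := (List.pairwise_cons.1 hp).1 b (by simp)
        have hnoc : c ∉ b :: t' := by
          intro hmem
          rcases List.mem_cons.1 hmem with h | h
          · exact hbc h.symm
          · have hp' : List.Pairwise (· ≤ ·) (b :: t') := hp.sublist (by simp)
            have hble : b ≤ c := (List.pairwise_cons.1 hp').1 c h
            exact hbc (le_antisymm hble hcb)
        have hc1 : (c :: b :: t').count c = 1 := by
          rw [List.count_cons_self, List.count_eq_zero.2 hnoc]
        have hfeq : (b :: t').filter (fun y => decide (y ≠ c)) = b :: t' := by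
          apply List.filter_eq_self.2
          intro y hy
          simp only [decide_eq_true_eq]
          intro hyc
          exact hnoc (hyc ▸ hy)
        rw [hc1, hfeq]
        simp

-- the sweep computes sqSum on a sorted list
lemma main_sweep : ∀ (n : Nat) (ys : List Char), ys.length ≤ n →
    List.Pairwise (· ≤ ·) ys →
    ∀ (prev : Option Char) (ans run : Int), (∀ y ∈ ys, some y ≠ prev) →
      ((ys.foldl bStep (ans, prev, run)).1 + (ys.foldl bStep (ans, prev, run)).2.2 ^ 2)
        = ans + run ^ 2 + sqSum ys := by
  intro n
  induction n with
  | zero =>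
      intro ys hlen _ prev ans run _
      rw [List.length_eq_zero_iff.1 (Nat.le_zero.1 hlen)]
      simp [sqSum]
  | succ n ih =>
      intro ys hlen hsort prev ans run hprev
      match ys, hprev with
      | [], _ => simp [sqSum]
      | c :: t, hprev =>
        have hdec := sorted_head_decomp t c hsort
        set zs := t.filter (fun y => decide (y ≠ c)) with hzs
        have hk : (c :: t).count c = t.count c + 1 := by rw [List.count_cons_self]
        -- run the first step: it closes the previous run
        have hstep : bStep (ans, prev, run) c = (ans + run ^ 2, some c, 1) := by
          simp [bStep, (hprev c (by simp))]
        -- fold over the replicate block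
        have hfold : (c :: t).foldl bStep (ans, prev, run)
            = zs.foldl bStep (ans + run ^ 2, some c, 1 + (t.count c : Int)) := by
          conv_lhs => rw [hdec]
          rw [hk, List.replicate_succ, List.cons_append, List.foldl_cons, hstep,
            bStep_replicate]
        rw [hfold]
        have hsortzs : List.Pairwise (· ≤ ·) zs := hsort.sublist (List.Sublist.cons c t.filter_sublist)
        have hlenzs : zs.length ≤ n := by
          have h1 : zs.length ≤ t.length := t.length_filter_le _
          have h2 : t.length + 1 ≤ n + 1 := by simpa using hlen
          omega
        have hprevzs : ∀ y ∈ zs, some y ≠ some c := by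
          intro y hy
          simp only [hzs, List.mem_filter, decide_eq_true_eq] at hy
          simpa using hy.2
        rw [ih zs hlenzs hsortzs (some c) (ans + run ^ 2) (1 + (t.count c : Int)) hprevzs]
        rw [sqSum_cons c t, ← hzs, hk]
        push_cast
        ring

lemma solve_alt_eq_sqSum (s : String) : solve_alt s = sqSum s.toList := by
  unfold solve_alt
  have hsort := PySem.List.sorted_pairwise s.toList (fun x => x)
  have := main_sweep (PySem.List.sorted s.toList (fun x => x) false).length
    (PySem.List.sorted s.toList (fun x => x) false) le_rfl hsort none 0 0
    (by intro y _; simp)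
  simp only [] at this ⊢
  rw [this]
  rw [sqSum_perm (PySem.List.sorted_perm s.toList (fun x => x) false)]
  push_cast
  ring

-- ===== VERDICT (by name: the statement is the Claim_ definition above) =====
theorem solve_spec : Claim_equal_solve := by
  intro s _
  unfold Spec_solve
  rw [solve_eq_sqSum, solve_alt_eq_sqSum]
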